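-- pv_equiv track=rewrite | github.com/libbyqstephan/BDD_with_pyEDA | cpts350-final_project.py | gen_edge_combos
-- ===== SOURCE A (Python) =====
-- def gen_edge_combos(nodes):
--     edges = []
--     for i in nodes:
--         for j in nodes:
--             condition = ((i+3)%32 == j%32) or ((i+8)%32 == j%32)
--             if condition == True:
--                 edges.append([i,j])
--     return edges
-- ===== SOURCE B (Python) =====
-- def _merge(a, b):
--     # merge two index-sorted (idx, value) lists by idx
--     out = []
--     k = 0
--     l = 0
--     while k < len(a) and l < len(b):
--         if a[k][0] < b[l][0]:
--             out.append(a[k]); k += 1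
--         else:
--             out.append(b[l]); l += 1
--     out.extend(a[k:])
--     out.extend(b[l:])
--     return out
--
-- def gen_edge_combos(nodes):
--     buckets = {}
--     for idx, v in enumerate(nodes):
--         buckets.setdefault(v % 32, []).append((idx, v))
--     edges = []
--     for i in nodes:
--         a = buckets.get((i + 3) % 32, [])
--         b = buckets.get((i + 8) % 32, [])
--         for p in _merge(a, b):
--             edges.append([i, p[1]])
--     return edges
-- ===== Notes on version B (the rewrite author's own statement) =====
-- stated objective: faster
-- what changed: Replaces the quadratic double scan with a one-pass bucketing of nodes by residue mod 32 (keeping original indices), then per outer node merges the two matching buckets by original index, so the inner scan over all nodes disappears.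
import Mathlib
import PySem

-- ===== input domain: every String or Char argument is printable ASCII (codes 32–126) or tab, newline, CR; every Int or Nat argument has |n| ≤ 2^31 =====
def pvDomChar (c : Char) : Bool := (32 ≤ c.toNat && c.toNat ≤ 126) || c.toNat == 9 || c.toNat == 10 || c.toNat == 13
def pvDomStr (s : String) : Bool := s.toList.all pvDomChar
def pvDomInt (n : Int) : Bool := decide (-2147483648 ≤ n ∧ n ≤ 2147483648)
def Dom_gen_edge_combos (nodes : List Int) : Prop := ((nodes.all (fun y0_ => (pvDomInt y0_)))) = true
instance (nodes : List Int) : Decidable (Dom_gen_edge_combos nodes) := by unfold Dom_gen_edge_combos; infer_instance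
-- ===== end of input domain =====

-- B replaces A's quadratic double scan by bucketing nodes by residue mod 32 once and, per outer
-- node, merging the two matching buckets by original index (objective: faster, asymptotic).

-- ===== PORT A =====
def gen_edge_combos (nodes : List Int) : List (List Int) :=
  nodes.foldl (fun edges i =>
    nodes.foldl (fun edges j =>
      if (PySem.Int.mod (i+3) 32 == PySem.Int.mod j 32) ||
         (PySem.Int.mod (i+8) 32 == PySem.Int.mod j 32)
      then edges ++ [[i, j]] else edges) edges) []

-- ===== PORT B =====
-- Source B's _merge: merge two index-sorted (idx, value) lists by idx
def pvMerge : List (Int × Int) → List (Int × Int) → List (Int × Int)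
  | [], b => b
  | x :: a, [] => x :: a
  | x :: a, y :: b =>
    if x.1 < y.1 then x :: pvMerge a (y :: b) else y :: pvMerge (x :: a) b

def gen_edge_combos_alt (nodes : List Int) : List (List Int) :=
  let buckets := (PySem.List.enumerate nodes).foldl
      (fun d p => d.modify (PySem.Int.mod p.2 32) [] (· ++ [p])) PySem.Dict.empty
  nodes.foldl (fun edges i =>
    edges ++ (pvMerge (buckets.getD (PySem.Int.mod (i+3) 32) [])
                      (buckets.getD (PySem.Int.mod (i+8) 32) [])).map (fun p => [i, p.2])) []

-- ===== PRECONDITION & SPEC =====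
def Spec_gen_edge_combos (nodes : List Int) (out : List (List Int)) : Prop := out = gen_edge_combos_alt nodes
instance (nodes : List Int) (out : List (List Int)) : Decidable (Spec_gen_edge_combos nodes out) := by unfold Spec_gen_edge_combos; infer_instance

-- ===== CLAIM (what is proved, stated in full; the proofs are below) =====
def Claim_equal_gen_edge_combos : Prop := ∀ (nodes : List Int), Dom_gen_edge_combos nodes → Spec_gen_edge_combos nodes (gen_edge_combos nodes)

-- ===== LEMMAS AND PROOFS =====

theorem pvMerge_cons_left (x : Int × Int) (a b : List (Int × Int))
    (h : ∀ y ∈ b, x.1 < y.1) : pvMerge (x :: a) b = x :: pvMerge a b := by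
  cases b with
  | nil => cases a <;> simp [pvMerge]
  | cons y b' =>
    have := h y (by simp)
    simp [pvMerge, this]

theorem pvMerge_cons_right (x : Int × Int) (a b : List (Int × Int))
    (h : ∀ y ∈ a, x.1 < y.1) : pvMerge a (x :: b) = x :: pvMerge a b := by
  cases a with
  | nil => simp [pvMerge]
  | cons y a' =>
    have hx := h y (by simp)
    have : ¬ y.1 < x.1 := by omega
    simp [pvMerge, this]

theorem pvMerge_filter (l : List (Int × Int)) (p q : Int × Int → Bool)
    (hpq : ∀ x, ¬(p x = true ∧ q x = true))
    (hl : l.Pairwise (fun a b => a.1 < b.1)) :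
    pvMerge (l.filter p) (l.filter q) = l.filter (fun x => p x || q x) := by
  induction l with
  | nil => simp [pvMerge]
  | cons x l ih =>
    have hlt : ∀ y ∈ l, x.1 < y.1 := (List.pairwise_cons.mp hl).1
    have hl' := (List.pairwise_cons.mp hl).2
    by_cases hp : p x = true
    · have hq : q x = false := by
        cases hq' : q x
        · rfl
        · exact absurd ⟨hp, hq'⟩ (hpq x)
      have h1 : ∀ y ∈ l.filter q, x.1 < y.1 := fun y hy => hlt y (List.mem_of_mem_filter hy)
      simp only [List.filter_cons, hp, hq, Bool.true_or, Bool.false_eq_true, if_true, if_false]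
      rw [pvMerge_cons_left x _ _ h1, ih hl']
    · by_cases hq : q x = true
      · have h1 : ∀ y ∈ l.filter p, x.1 < y.1 := fun y hy => hlt y (List.mem_of_mem_filter hy)
        simp only [List.filter_cons, hp, hq, Bool.or_true, Bool.false_eq_true, if_true, if_false]
        rw [pvMerge_cons_right x _ _ h1, ih hl']
      · simp only [Bool.not_eq_true] at hp hq
        simp only [List.filter_cons, hp, hq, Bool.or_self, Bool.false_eq_true, if_false]
        exact ih hl'

-- the buckets dict characterized: bucket c = the enumerated nodes with residue c, in order
theorem buckets_getD (nodes : List Int) (c : Int) :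
    ((PySem.List.enumerate nodes).foldl
      (fun d p => d.modify (PySem.Int.mod p.2 32) [] (· ++ [p])) PySem.Dict.empty).getD c []
    = (PySem.List.enumerate nodes).filter (fun p => PySem.Int.mod p.2 32 == c) := by
  have h := PySem.Dict.getD_foldl_modify_append
      (l := (PySem.List.enumerate nodes).map (fun p => (PySem.Int.mod p.2 32, p)))
      (d := PySem.Dict.empty) (c := c)
  rw [List.foldl_map] at h
  simp only [h, PySem.Dict.getD_empty, List.nil_append, List.filter_map, List.map_map]
  simp [Function.comp_def]

-- residues (i+3)%32 and (i+8)%32 never coincide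
theorem residues_ne (i : Int) : PySem.Int.mod (i+3) 32 ≠ PySem.Int.mod (i+8) 32 := by
  rw [PySem.Int.mod_eq_emod_of_pos (by norm_num : (0:Int) < 32),
    PySem.Int.mod_eq_emod_of_pos (by norm_num : (0:Int) < 32)]
  omega

-- per outer node i, B's merged buckets mapped = A's inner filtered scan
theorem inner_eq (nodes : List Int) (i : Int) :
    (pvMerge (((PySem.List.enumerate nodes).foldl
        (fun d p => d.modify (PySem.Int.mod p.2 32) [] (· ++ [p])) PySem.Dict.empty).getD
          (PySem.Int.mod (i+3) 32) [])
      (((PySem.List.enumerate nodes).foldl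
        (fun d p => d.modify (PySem.Int.mod p.2 32) [] (· ++ [p])) PySem.Dict.empty).getD
          (PySem.Int.mod (i+8) 32) [])).map (fun p => [i, p.2])
    = (nodes.filter (fun j => (PySem.Int.mod (i+3) 32 == PySem.Int.mod j 32) ||
        (PySem.Int.mod (i+8) 32 == PySem.Int.mod j 32))).map (fun j => [i, j]) := by
  rw [buckets_getD, buckets_getD]
  rw [pvMerge_filter _ _ _
      (by
        intro x ⟨h3, h8⟩
        exact residues_ne i (by
          rw [beq_iff_eq] at h3 h8
          exact h3.symm.trans h8))
      (PySem.List.pairwise_lt_enumerate nodes 0)]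
  have hcomm : (fun x : Int × Int =>
        (PySem.Int.mod x.2 32 == PySem.Int.mod (i+3) 32) ||
        (PySem.Int.mod x.2 32 == PySem.Int.mod (i+8) 32))
      = (fun x : Int × Int =>
        (PySem.Int.mod (i+3) 32 == PySem.Int.mod x.2 32) ||
        (PySem.Int.mod (i+8) 32 == PySem.Int.mod x.2 32)) := by
    funext x
    simp [BEq.comm]
  rw [hcomm]
  have : ((PySem.List.enumerate nodes).filter (fun x =>
        (PySem.Int.mod (i+3) 32 == PySem.Int.mod x.2 32) ||
        (PySem.Int.mod (i+8) 32 == PySem.Int.mod x.2 32))).map (fun p : Int × Int => [i, p.2])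
      = (((PySem.List.enumerate nodes).filter (fun x =>
        (PySem.Int.mod (i+3) 32 == PySem.Int.mod x.2 32) ||
        (PySem.Int.mod (i+8) 32 == PySem.Int.mod x.2 32))).map (·.2)).map (fun j => [i, j]) := by
    rw [List.map_map]; rfl
  rw [this]
  have : ((PySem.List.enumerate nodes).filter (fun x =>
        (PySem.Int.mod (i+3) 32 == PySem.Int.mod x.2 32) ||
        (PySem.Int.mod (i+8) 32 == PySem.Int.mod x.2 32))).map (·.2)
      = ((PySem.List.enumerate nodes).map (·.2)).filter (fun j =>
        (PySem.Int.mod (i+3) 32 == PySem.Int.mod j 32) ||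
        (PySem.Int.mod (i+8) 32 == PySem.Int.mod j 32)) := by
    rw [List.filter_map]; rfl
  rw [this, PySem.List.map_snd_enumerate]

-- ===== VERDICT (by name: the statement is the Claim_ definition above) =====
theorem gen_edge_combos_spec : Claim_equal_gen_edge_combos := by
  intro nodes _
  unfold Spec_gen_edge_combos gen_edge_combos gen_edge_combos_alt
  apply List.foldl_ext
  intro edges i _
  rw [PySem.List.foldl_append_if
      (p := fun j => (PySem.Int.mod (i+3) 32 == PySem.Int.mod j 32) ||
        (PySem.Int.mod (i+8) 32 == PySem.Int.mod j 32))
      (f := fun j => [i, j]),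
    inner_eq]
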